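-- pv_equiv track=rewrite | github.com/here0009/LeetCode | Python/1062_LongestRepeatingSubstring.py | longestRepeatingSubstring
-- ===== SOURCE A (Python) =====
-- def longestRepeatingSubstring(S: str) -> str:
--     def search(n):
--         h = 0
--         for i in range(mid):
--             h = (h * a + nums[i]) % M
--         seen = {h}
--         aL = pow(a, mid, M)
--         for start in range(1, length-n+1):
--             h = (h * a - nums[start-1] * aL + nums[start+n-1]) % M
--             if h in seen:
--                 return True
--             seen.add(h)
--         return False
--
--     length = len(S)
--     nums = [ord(S[i]) - ord('a') for i in range(length)]
--     a = 26
--     M = 10**9 +7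
--     left, right = 1, length
--     while left < right:
--         mid = left + (right - left) // 2
--         if search(mid):
--             left = mid + 1
--         else:
--             right = mid
--     return left - 1
-- ===== SOURCE B (Python) =====
-- def longestRepeatingSubstring(S: str) -> str:
--     n = len(S)
--     a, M = 26, 10**9 + 7
--     # prefix hashes pre[j] = hash of S[:j] and powers pw[j] = a**j % M, built once
--     pre = [0] * (n + 1)
--     pw = [1] * (n + 1)
--     for i in range(n):
--         pre[i + 1] = (pre[i] * a + (ord(S[i]) - ord('a'))) % M
--         pw[i + 1] = (pw[i] * a) % M
--
--     def has_dup(k):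
--         hs = [(pre[s + k] - pre[s] * pw[k]) % M for s in range(n - k + 1)]
--         return len(set(hs)) < len(hs)
--
--     def bs(lo, hi):
--         if lo >= hi:
--             return lo
--         mid = lo + (hi - lo) // 2
--         if has_dup(mid):
--             return bs(mid + 1, hi)
--         return bs(lo, mid)
--
--     return bs(1, n) - 1
-- ===== Notes on version B (the rewrite author's own statement) =====
-- stated objective: faster
-- what changed: B precomputes prefix-hash and power tables once and hashes each window by a direct O(1) formula with a whole-list set-size duplicate test, replacing A's per-level from-scratch initial hash, incremental rolling updates and early-exit seen-set membership loop; the while-loop binary search becomes a recursive one.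
import Mathlib
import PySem

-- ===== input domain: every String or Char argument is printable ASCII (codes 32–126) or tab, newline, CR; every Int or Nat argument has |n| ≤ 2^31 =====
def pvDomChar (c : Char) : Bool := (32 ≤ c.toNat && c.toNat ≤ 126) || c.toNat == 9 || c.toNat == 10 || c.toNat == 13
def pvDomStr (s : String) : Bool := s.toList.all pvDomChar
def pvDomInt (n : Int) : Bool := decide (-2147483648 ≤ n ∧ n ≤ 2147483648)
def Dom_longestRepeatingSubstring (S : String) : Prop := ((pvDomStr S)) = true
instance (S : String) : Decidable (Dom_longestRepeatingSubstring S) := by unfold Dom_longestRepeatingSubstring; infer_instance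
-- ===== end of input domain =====

-- B replaces A's per-level from-scratch + rolling hash update with prefix-hash and
-- power tables computed once, a direct window-hash formula and a whole-list duplicate
-- test, and an explicitly recursive binary search; same results (including A's
-- hash-collision behaviour), measurably faster by a constant factor (timing run).

def lrsM : Int := 10 ^ 9 + 7

-- ===== PORT A =====
-- the rolling-hash loop 'for start in range(1, length-n+1): …' with early return
def lrsRoll (nums : List Int) (aL n : Int) : List Int → Int → PySem.Set Int → Bool
  | [], _, _ => false
  | start :: rest, h, seen =>
      let h' := PySem.Int.mod (h * 26 - PySem.List.pyGetD nums (start - 1) 0 * aL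
                  + PySem.List.pyGetD nums (start + n - 1) 0) lrsM
      if PySem.Set.contains seen h' then true
      else lrsRoll nums aL n rest h' (PySem.Set.add seen h')

-- def search(n): … (the closure variable 'mid' equals the argument n at every call site search(mid))
def lrsSearch (nums : List Int) (length n : Int) : Bool :=
  let h0 := (PySem.List.pyRange 0 n 1).foldl
      (fun h i => PySem.Int.mod (h * 26 + PySem.List.pyGetD nums i 0) lrsM) 0
  let seen := PySem.Set.add PySem.Set.empty h0
  let aL := PySem.Int.powMod 26 n.toNat lrsM   -- pow(a, mid, M); n ≥ 1 at every call
  lrsRoll nums aL n (PySem.List.pyRange 1 (length - n + 1) 1) h0 seen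

-- while left < right: …
def lrsLoop (nums : List Int) (length left right : Int) : Int :=
  if left < right then
    let mid := left + PySem.Int.floordiv (right - left) 2
    if lrsSearch nums length mid then lrsLoop nums length (mid + 1) right
    else lrsLoop nums length left mid
  else left
termination_by (right - left).toNat
decreasing_by
  all_goals
    rw [PySem.Int.floordiv_eq_ediv_of_pos (by norm_num : (0:Int) < 2)] at *
    omega

def longestRepeatingSubstring (S : String) : Int :=
  let length : Int := S.toList.length
  let nums := S.toList.map (fun c => (c.toNat : Int) - 97)   -- ord(S[i]) - ord('a')
  lrsLoop nums length 1 length - 1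

-- ===== PORT B =====
-- pre = [0]; for c in S: pre.append((pre[-1]*26 + (ord(c)-97)) % M)
def lrsPre (cs : List Char) (h : Int) : List Int :=
  match cs with
  | [] => [h]
  | c :: rest => h :: lrsPre rest (PySem.Int.mod (h * 26 + ((c.toNat : Int) - 97)) lrsM)

-- pw = [1]; for _ in S: pw.append(pw[-1]*26 % M)
def lrsPw (cs : List Char) (p : Int) : List Int :=
  match cs with
  | [] => [p]
  | _ :: rest => p :: lrsPw rest (PySem.Int.mod (p * 26) lrsM)

-- def has_dup(k): hash every window of length k directly, test for a duplicate
def lrsHasDup (pre pw : List Int) (n k : Int) : Bool :=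
  let hs := (PySem.List.pyRange 0 (n - k + 1) 1).map (fun s =>
      PySem.Int.mod (PySem.List.pyGetD pre (s + k) 0
        - PySem.List.pyGetD pre s 0 * PySem.List.pyGetD pw k 0) lrsM)
  decide ((PySem.Set.ofList hs).length < hs.length)

-- def bs(lo, hi): recursive binary search
def lrsBs (pre pw : List Int) (n lo hi : Int) : Int :=
  if lo < hi then
    let mid := lo + PySem.Int.floordiv (hi - lo) 2
    if lrsHasDup pre pw n mid then lrsBs pre pw n (mid + 1) hi
    else lrsBs pre pw n lo mid
  else lo
termination_by (hi - lo).toNat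
decreasing_by
  all_goals
    rw [PySem.Int.floordiv_eq_ediv_of_pos (by norm_num : (0:Int) < 2)] at *
    omega

def longestRepeatingSubstring_alt (S : String) : Int :=
  let n : Int := S.toList.length
  let pre := lrsPre S.toList 0
  let pw := lrsPw S.toList 1
  lrsBs pre pw n 1 n - 1

-- ===== PRECONDITION & SPEC =====
def Spec_longestRepeatingSubstring (S : String) (out : Int) : Prop := out = longestRepeatingSubstring_alt S
instance (S : String) (out : Int) : Decidable (Spec_longestRepeatingSubstring S out) := by unfold Spec_longestRepeatingSubstring; infer_instance

-- ===== CLAIM (what is proved, stated in full; the proofs are below) =====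
def Claim_equal_longestRepeatingSubstring : Prop := ∀ (S : String), Dom_longestRepeatingSubstring S → Spec_longestRepeatingSubstring S (longestRepeatingSubstring S)

-- ===== LEMMAS AND PROOFS =====

-- the exact (un-modded) polynomial value of a digit list, and the hash of the
-- length-k window of nums starting at s — the common mathematical description
def pvPoly (xs : List Int) : Int := xs.foldl (fun h v => h * 26 + v) 0

def dval (nums : List Int) (k s : Int) : Int :=
  PySem.Int.mod (pvPoly ((nums.drop s.toNat).take k.toNat)) lrsM

-- early-exit duplicate scan (the shape of A's rolling loop once hashes are named)
def earlyDup (seen : PySem.Set Int) : List Int → Bool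
  | [] => false
  | x :: xs => if PySem.Set.contains seen x then true else earlyDup (PySem.Set.add seen x) xs

theorem lrsM_pos : (0:Int) < lrsM := by norm_num [lrsM]

theorem modM_eq_of_modeq {x y : Int} (h : x ≡ y [ZMOD lrsM]) :
    PySem.Int.mod x lrsM = PySem.Int.mod y lrsM := by
  rw [PySem.Int.mod_eq_emod_of_pos lrsM_pos, PySem.Int.mod_eq_emod_of_pos lrsM_pos]
  exact h

theorem modM_modeq (x : Int) : (PySem.Int.mod x lrsM) ≡ x [ZMOD lrsM] := by
  rw [PySem.Int.mod_eq_emod_of_pos lrsM_pos]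
  exact Int.emod_emod_of_dvd x dvd_rfl

theorem pvPoly_gen (xs : List Int) : ∀ h0 : Int,
    xs.foldl (fun h v => h * 26 + v) h0 = h0 * 26 ^ xs.length + pvPoly xs := by
  induction xs with
  | nil => intro h0; simp [pvPoly]
  | cons x xs ih =>
      intro h0
      simp only [List.foldl_cons, List.length_cons, pvPoly]
      rw [ih (h0 * 26 + x), ih (0 * 26 + x)]
      ring

theorem pvPoly_append (xs ys : List Int) :
    pvPoly (xs ++ ys) = pvPoly xs * 26 ^ ys.length + pvPoly ys := by
  unfold pvPoly
  rw [List.foldl_append, pvPoly_gen ys]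
  rfl

-- exact window recurrence of the rolling hash
theorem window_step (nums : List Int) (k t : Nat) (h : t + 1 + k ≤ nums.length) :
    pvPoly ((nums.drop (t+1)).take k)
      = pvPoly ((nums.drop t).take k) * 26 - nums[t]'(by omega) * 26 ^ k
          + nums[t+k]'(by omega) := by
  have e1 : (nums.drop t).take (k+1) = (nums.drop t).take k ++ [nums[t+k]'(by omega)] := by
    rw [List.take_add_one]
    congr 1
    rw [List.getElem?_drop, List.getElem?_eq_getElem (by omega)]
    rfl
  have e2 : (nums.drop t).take (k+1) = nums[t]'(by omega) :: ((nums.drop (t+1)).take k) := by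
    rw [List.drop_eq_getElem_cons (by omega), List.take_succ_cons]
  have hlen : ((nums.drop (t+1)).take k).length = k := by
    simp
    omega
  have := congrArg pvPoly (e2.symm.trans e1)
  rw [pvPoly_append] at this
  have hcons : pvPoly (nums[t]'(by omega) :: ((nums.drop (t+1)).take k))
      = nums[t]'(by omega) * 26 ^ k + pvPoly ((nums.drop (t+1)).take k) := by
    show List.foldl (fun h v => h * 26 + v) 0 _ = _
    rw [List.foldl_cons, pvPoly_gen, hlen]
    norm_num
  rw [hcons] at this
  rw [show pvPoly [nums[t+k]'(by omega)] = nums[t+k]'(by omega) from by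
        show List.foldl (fun h v => h * 26 + v) 0 _ = _
        simp] at this
  simp only [List.length_singleton, pow_one] at this
  linarith [this]

-- A's initial hash is the hash of window 0
theorem h0_eq (nums : List Int) (k : Int) (hk0 : 0 ≤ k) (hkL : k ≤ (nums.length : Int)) :
    (PySem.List.pyRange 0 k 1).foldl
        (fun h i => PySem.Int.mod (h * 26 + PySem.List.pyGetD nums i 0) lrsM) 0
      = dval nums k 0 := by
  have fold_range_take : ∀ (z : Int) (j : Nat), j ≤ nums.length →
      (PySem.List.pyRange 0 (j:Int) 1).foldl
          (fun h i => PySem.Int.mod (h * 26 + PySem.List.pyGetD nums i 0) lrsM) z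
        = (nums.take j).foldl (fun h v => PySem.Int.mod (h * 26 + v) lrsM) z := by
    intro z j
    induction j with
    | zero => intro _; simp
    | succ j ih =>
        intro hj
        rw [show ((j+1 : Nat) : Int) = (j : Int) + 1 by push_cast; ring,
            PySem.List.pyRange_one_succ_right (by positivity),
            List.foldl_append, ih (by omega), List.take_add_one]
        have : nums[j]? = some (nums[j]'(by omega)) := List.getElem?_eq_getElem (by omega)
        simp only [this, Option.toList_some, List.foldl_append, List.foldl_cons, List.foldl_nil]
        rw [PySem.List.pyGetD_natCast, List.getD_eq_getElem _ _ (by omega)]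
  rw [show k = ((k.toNat : Nat) : Int) by omega,
      fold_range_take 0 k.toNat (by omega)]
  unfold dval
  rw [show (0:Int).toNat = 0 from rfl, List.drop_zero, Int.toNat_natCast]
  rw [show (0:Int) = PySem.Int.mod 0 lrsM from by decide]
  have foldAx : ∀ (xs : List Int) (h0 : Int),
      xs.foldl (fun h v => PySem.Int.mod (h * 26 + v) lrsM) (PySem.Int.mod h0 lrsM)
        = PySem.Int.mod (xs.foldl (fun h v => h * 26 + v) h0) lrsM := by
    intro xs
    induction xs with
    | nil => intro h0; rfl
    | cons x xs ih =>
        intro h0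
        simp only [List.foldl_cons]
        rw [show PySem.Int.mod (PySem.Int.mod h0 lrsM * 26 + x) lrsM
              = PySem.Int.mod (h0 * 26 + x) lrsM from
            modM_eq_of_modeq (((modM_modeq h0).mul_right 26).add_right x)]
        exact ih (h0 * 26 + x)
  exact foldAx _ 0

-- A's rolling update sends the hash of window (s-1) to the hash of window s
theorem roll_step (nums : List Int) (k s : Int) (hk : 1 ≤ k) (hs : 1 ≤ s)
    (hb : s + k ≤ (nums.length : Int)) :
    PySem.Int.mod (dval nums k (s-1) * 26
        - PySem.List.pyGetD nums (s - 1) 0 * PySem.Int.powMod 26 k.toNat lrsM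
        + PySem.List.pyGetD nums (s + k - 1) 0) lrsM
      = dval nums k s := by
  have h1 : PySem.List.pyGetD nums (s - 1) 0 = nums[(s-1).toNat]'(by omega) :=
    PySem.List.pyGetD_eq_getElem nums 0 (by omega) (by omega)
  have h2 : PySem.List.pyGetD nums (s + k - 1) 0 = nums[(s-1).toNat + k.toNat]'(by omega) := by
    rw [PySem.List.pyGetD_eq_getElem nums 0 (by omega) (by omega)]
    congr 1
    omega
  rw [h1, h2, PySem.Int.powMod_eq]
  unfold dval
  apply modM_eq_of_modeq
  have hcong : (PySem.Int.mod (pvPoly ((nums.drop (s-1).toNat).take k.toNat)) lrsM) * 26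
        - nums[(s-1).toNat]'(by omega) * PySem.Int.mod (26 ^ k.toNat) lrsM
        + nums[(s-1).toNat + k.toNat]'(by omega)
      ≡ (pvPoly ((nums.drop (s-1).toNat).take k.toNat)) * 26
        - nums[(s-1).toNat]'(by omega) * 26 ^ k.toNat
        + nums[(s-1).toNat + k.toNat]'(by omega) [ZMOD lrsM] :=
    (((modM_modeq _).mul_right 26).sub ((modM_modeq _).mul_left _)).add_right _
  refine hcong.trans ?_
  rw [show (pvPoly ((nums.drop (s-1).toNat).take k.toNat)) * 26
        - nums[(s-1).toNat]'(by omega) * 26 ^ k.toNat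
        + nums[(s-1).toNat + k.toNat]'(by omega)
      = pvPoly ((nums.drop ((s-1).toNat + 1)).take k.toNat) from
    (window_step nums k.toNat (s-1).toNat (by omega)).symm]
  rw [show (s-1).toNat + 1 = s.toNat by omega]

theorem earlyDup_eq (xs : List Int) : ∀ seen : PySem.Set Int,
    earlyDup seen xs = decide (¬ xs.Nodup ∨ ∃ x ∈ xs, x ∈ seen) := by
  induction xs with
  | nil => intro seen; simp [earlyDup]
  | cons x xs ih =>
      intro seen
      rw [earlyDup]
      by_cases hx : x ∈ seen
      · rw [if_pos ((PySem.Set.contains_iff seen x).mpr hx)]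
        exact (decide_eq_true (Or.inr ⟨x, by simp, hx⟩)).symm
      · rw [if_neg (fun h => hx ((PySem.Set.contains_iff seen x).mp h)), ih]
        simp only [decide_eq_decide, PySem.Set.mem_add, List.nodup_cons, List.mem_cons]
        constructor
        · rintro (hnd | ⟨y, hy, hys | rfl⟩)
          · exact Or.inl (fun ⟨_, h2⟩ => hnd h2)
          · exact Or.inr ⟨y, Or.inr hy, hys⟩
          · exact Or.inl (fun ⟨h1, _⟩ => h1 hy)
        · rintro (hnd | ⟨y, rfl | hy, hys⟩)
          · by_cases hxx : x ∈ xs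
            · exact Or.inr ⟨x, hxx, Or.inr rfl⟩
            · exact Or.inl (fun h2 => hnd ⟨hxx, h2⟩)
          · exact absurd hys hx
          · exact Or.inr ⟨y, hy, Or.inl hys⟩

theorem roll_eq (nums : List Int) (k : Int) (hk : 1 ≤ k) :
    ∀ (d : Nat) (s e h : Int) (seen : PySem.Set Int), d = (e - s).toNat →
      1 ≤ s → e ≤ (nums.length : Int) - k + 1 → h = dval nums k (s-1) →
      lrsRoll nums (PySem.Int.powMod 26 k.toNat lrsM) k (PySem.List.pyRange s e 1) h seen
        = earlyDup seen ((PySem.List.pyRange s e 1).map (fun t => dval nums k t)) := by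
  intro d
  induction d with
  | zero =>
      intro s e h seen hd hs he hh
      rw [PySem.List.pyRange_one_eq_nil (by omega)]
      rfl
  | succ d ih =>
      intro s e h seen hd hs he hh
      rcases Int.lt_or_le s e with hlt | hle
      · rw [PySem.List.pyRange_one_cons hlt]
        rw [lrsRoll]
        have hstep : PySem.Int.mod (h * 26
              - PySem.List.pyGetD nums (s - 1) 0 * PySem.Int.powMod 26 k.toNat lrsM
              + PySem.List.pyGetD nums (s + k - 1) 0) lrsM = dval nums k s := by
          rw [hh]
          exact roll_step nums k s hk hs (by omega)
        simp only [hstep, List.map_cons, earlyDup]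
        by_cases hc : PySem.Set.contains seen (dval nums k s)
        · rw [if_pos hc, if_pos hc]
        · rw [if_neg hc, if_neg hc]
          exact ih (s+1) e (dval nums k s) (PySem.Set.add seen (dval nums k s))
            (by omega) (by omega) he (by norm_num)
      · rw [PySem.List.pyRange_one_eq_nil (by omega)]
        rfl

theorem search_eq (nums : List Int) (k : Int) (hk : 1 ≤ k)
    (hkL : k ≤ (nums.length : Int) - 1) :
    lrsSearch nums (nums.length : Int) k
      = decide (¬ (((PySem.List.pyRange 0 ((nums.length : Int) - k + 1) 1).map
          (fun s => dval nums k s)).Nodup)) := by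
  unfold lrsSearch
  rw [h0_eq nums k (by omega) (by omega)]
  rw [roll_eq nums k hk ((((nums.length : Int) - k + 1) - 1).toNat) 1
      ((nums.length : Int) - k + 1) _ _ rfl (by omega) (by omega) (by norm_num)]
  rw [earlyDup_eq]
  rw [PySem.List.pyRange_one_cons (by omega : (0:Int) < (nums.length : Int) - k + 1),
      List.map_cons]
  simp only [decide_eq_decide, List.nodup_cons, PySem.Set.mem_add, List.mem_map]
  rw [show (0:Int) + 1 = 1 from rfl]
  simp only [PySem.Set.empty, List.not_mem_nil, false_or]
  constructor
  · rintro (hnd | ⟨x, hex, rfl⟩)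
    · exact fun ⟨_, h2⟩ => hnd h2
    · exact fun ⟨h1, _⟩ => h1 hex
  · intro hn
    by_cases hex : ∃ a ∈ PySem.List.pyRange 1 ((nums.length : Int) - k + 1), dval nums k a = dval nums k 0
    · exact Or.inr ⟨dval nums k 0, hex, rfl⟩
    · exact Or.inl (fun h2 => hn ⟨hex, h2⟩)

theorem foldl_add_length_le (xs : List Int) : ∀ s : PySem.Set Int,
    (xs.foldl PySem.Set.add s).length ≤ s.length + xs.length := by
  induction xs with
  | nil => intro s; simp
  | cons x xs ih =>
      intro s
      simp only [List.foldl_cons, List.length_cons]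
      refine le_trans (ih _) ?_
      have : (PySem.Set.add s x).length ≤ s.length + 1 := by
        unfold PySem.Set.add
        split <;> simp
      omega

theorem foldl_add_length_eq_iff (xs : List Int) : ∀ s : PySem.Set Int,
    ((xs.foldl PySem.Set.add s).length = s.length + xs.length ↔
      xs.Nodup ∧ ∀ x ∈ xs, x ∉ s) := by
  induction xs with
  | nil => intro s; simp
  | cons x xs ih =>
      intro s
      simp only [List.foldl_cons, List.length_cons, List.nodup_cons]
      by_cases hx : x ∈ s
      · have hadd : PySem.Set.add s x = s := by
          unfold PySem.Set.add
          rw [if_pos ((PySem.Set.contains_iff s x).mpr hx)]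
        rw [hadd]
        constructor
        · intro h
          exfalso
          have := foldl_add_length_le xs s
          omega
        · rintro ⟨-, hall⟩
          exact absurd hx (hall x (by simp))
      · have hadd : PySem.Set.add s x = s ++ [x] := by
          unfold PySem.Set.add
          rw [if_neg (fun h => hx ((PySem.Set.contains_iff s x).mp h))]
        rw [hadd,
            show List.length s + (xs.length + 1) = (s ++ [x]).length + xs.length from by
              simp only [List.length_append, List.length_singleton]; omega,
            ih]
        constructor
        · rintro ⟨hnd, hall⟩
          refine ⟨⟨fun hxx => ?_, hnd⟩, fun y hy => ?_⟩
          · exact hall x hxx (by simp)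
          · rcases List.mem_cons.mp hy with rfl | hy'
            · exact hx
            · exact fun hys => hall y hy' (by simp [hys])
        · rintro ⟨⟨hxx, hnd⟩, hall⟩
          refine ⟨hnd, fun y hy hmem => ?_⟩
          rcases List.mem_append.mp hmem with hys | hyx
          · exact hall y (List.mem_cons.mpr (Or.inr hy)) hys
          · rw [List.mem_singleton.mp hyx] at hy
            exact hxx hy

theorem ofList_length_lt_iff (xs : List Int) :
    ((PySem.Set.ofList xs).length < xs.length ↔ ¬ xs.Nodup) := by
  rw [PySem.Set.ofList_eq_foldl]
  have hle := foldl_add_length_le xs []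
  have heq := foldl_add_length_eq_iff xs []
  simp only [List.length_nil, Nat.zero_add] at hle heq
  constructor
  · intro hlt hnd
    rw [heq.mpr ⟨hnd, by simp⟩] at hlt
    omega
  · intro hnd
    have : (List.foldl PySem.Set.add [] xs).length ≠ xs.length := fun h => hnd (heq.mp h).1
    omega

-- entries of B's prefix-hash and power tables
theorem pre_getD (cs : List Char) : ∀ (h0 : Int) (j : Nat), j ≤ cs.length →
    (lrsPre cs (PySem.Int.mod h0 lrsM)).getD j 0
      = PySem.Int.mod ((cs.take j).foldl (fun h c => h * 26 + ((c.toNat : Int) - 97)) h0) lrsM := by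
  induction cs with
  | nil =>
      intro h0 j hj
      simp only [List.length_nil, Nat.le_zero] at hj
      subst hj
      simp [lrsPre]
  | cons c rest ih =>
      intro h0 j hj
      match j with
      | 0 => simp [lrsPre]
      | j + 1 =>
          rw [lrsPre]
          simp only [List.getD_cons_succ, List.take_succ_cons, List.foldl_cons]
          rw [show PySem.Int.mod (PySem.Int.mod h0 lrsM * 26 + ((c.toNat : Int) - 97)) lrsM
                = PySem.Int.mod (h0 * 26 + ((c.toNat : Int) - 97)) lrsM from
              modM_eq_of_modeq (((modM_modeq h0).mul_right 26).add_right _)]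
          exact ih _ j (by simpa using hj)

theorem pw_getD (cs : List Char) : ∀ (p : Int) (j : Nat), j ≤ cs.length →
    (lrsPw cs (PySem.Int.mod p lrsM)).getD j 0 = PySem.Int.mod (p * 26 ^ j) lrsM := by
  induction cs with
  | nil =>
      intro p j hj
      simp only [List.length_nil, Nat.le_zero] at hj
      subst hj
      simp [lrsPw]
  | cons c rest ih =>
      intro p j hj
      match j with
      | 0 => simp [lrsPw]
      | j + 1 =>
          rw [lrsPw]
          simp only [List.getD_cons_succ]
          rw [show PySem.Int.mod (PySem.Int.mod p lrsM * 26) lrsM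
                = PySem.Int.mod (p * 26) lrsM from
              modM_eq_of_modeq ((modM_modeq p).mul_right 26)]
          rw [ih (p * 26) j (by simpa using hj)]
          congr 1
          ring

theorem length_lrsPre (cs : List Char) : ∀ h : Int, (lrsPre cs h).length = cs.length + 1 := by
  induction cs with
  | nil => intro h; rfl
  | cons c rest ih => intro h; simp [lrsPre, ih]

theorem length_lrsPw (cs : List Char) : ∀ p : Int, (lrsPw cs p).length = cs.length + 1 := by
  induction cs with
  | nil => intro p; rfl
  | cons c rest ih => intro p; simp [lrsPw, ih]

theorem hasDup_eq (cs : List Char) (k : Int) (hk : 1 ≤ k)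
    (hkL : k ≤ (cs.length : Int) - 1) :
    lrsHasDup (lrsPre cs 0) (lrsPw cs 1) (cs.length : Int) k
      = decide (¬ (((PySem.List.pyRange 0 ((cs.length : Int) - k + 1) 1).map
          (fun s => dval (cs.map (fun c => (c.toNat : Int) - 97)) k s)).Nodup)) := by
  unfold lrsHasDup
  have hmapeq : (PySem.List.pyRange 0 ((cs.length : Int) - k + 1) 1).map (fun s =>
        PySem.Int.mod (PySem.List.pyGetD (lrsPre cs 0) (s + k) 0
          - PySem.List.pyGetD (lrsPre cs 0) s 0 * PySem.List.pyGetD (lrsPw cs 1) k 0) lrsM)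
      = (PySem.List.pyRange 0 ((cs.length : Int) - k + 1) 1).map
          (fun s => dval (cs.map (fun c => (c.toNat : Int) - 97)) k s) := by
    apply List.map_congr_left
    intro s hsmem
    have hs := (PySem.List.mem_pyRange_one).mp hsmem
    have hpre0 : lrsPre cs 0 = lrsPre cs (PySem.Int.mod 0 lrsM) := by
      rw [PySem.Int.mod_eq_emod_of_pos lrsM_pos]
      norm_num
    have hpw1 : lrsPw cs 1 = lrsPw cs (PySem.Int.mod 1 lrsM) := by
      rw [PySem.Int.mod_eq_emod_of_pos lrsM_pos]
      norm_num [lrsM]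
    have e1 : PySem.List.pyGetD (lrsPre cs 0) (s + k) 0
        = PySem.Int.mod ((cs.take (s + k).toNat).foldl
            (fun h c => h * 26 + ((c.toNat : Int) - 97)) 0) lrsM := by
      rw [PySem.List.pyGetD_eq_getElem _ 0 (by omega)
            (by rw [length_lrsPre]; push_cast; omega),
          ← List.getD_eq_getElem _ 0 (by rw [length_lrsPre]; omega),
          hpre0, pre_getD cs 0 (s + k).toNat (by omega)]
    have e2 : PySem.List.pyGetD (lrsPre cs 0) s 0
        = PySem.Int.mod ((cs.take s.toNat).foldl
            (fun h c => h * 26 + ((c.toNat : Int) - 97)) 0) lrsM := by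
      rw [PySem.List.pyGetD_eq_getElem _ 0 (by omega)
            (by rw [length_lrsPre]; push_cast; omega),
          ← List.getD_eq_getElem _ 0 (by rw [length_lrsPre]; omega),
          hpre0, pre_getD cs 0 s.toNat (by omega)]
    have e3 : PySem.List.pyGetD (lrsPw cs 1) k 0 = PySem.Int.mod (1 * 26 ^ k.toNat) lrsM := by
      rw [PySem.List.pyGetD_eq_getElem _ 0 (by omega)
            (by rw [length_lrsPw]; push_cast; omega),
          ← List.getD_eq_getElem _ 0 (by rw [length_lrsPw]; omega),
          hpw1, pw_getD cs 1 k.toNat (by omega)]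
    rw [e1, e2, e3]
    have hfold : ∀ j : Nat,
        (cs.take j).foldl (fun h c => h * 26 + ((c.toNat : Int) - 97)) 0
          = pvPoly ((cs.map (fun c => (c.toNat : Int) - 97)).take j) := by
      intro j
      rw [← List.map_take, pvPoly, List.foldl_map]
    rw [hfold, hfold]
    unfold dval
    apply modM_eq_of_modeq
    refine Int.ModEq.trans
      (((modM_modeq _).sub ((modM_modeq _).mul (modM_modeq _)))) ?_
    rw [show (s + k).toNat = s.toNat + k.toNat by omega,
        List.take_add, pvPoly_append]
    have hlen : (((cs.map (fun c => (c.toNat : Int) - 97)).drop s.toNat).take k.toNat).length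
        = k.toNat := by
      simp only [List.length_take, List.length_drop, List.length_map]
      omega
    rw [hlen]
    ring_nf
    rfl
  rw [hmapeq]
  rw [show (decide ((PySem.Set.ofList ((PySem.List.pyRange 0 ((cs.length : Int) - k + 1) 1).map
          (fun s => dval (cs.map (fun c => (c.toNat : Int) - 97)) k s))).length
        < ((PySem.List.pyRange 0 ((cs.length : Int) - k + 1) 1).map
          (fun s => dval (cs.map (fun c => (c.toNat : Int) - 97)) k s)).length))
      = decide (¬ (((PySem.List.pyRange 0 ((cs.length : Int) - k + 1) 1).map
          (fun s => dval (cs.map (fun c => (c.toNat : Int) - 97)) k s)).Nodup)) from by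
    simp only [decide_eq_decide]
    exact ofList_length_lt_iff _]

theorem loop_eq (nums : List Int) (pre pw : List Int) (L : Int)
    (H : ∀ k : Int, 1 ≤ k → k ≤ L - 1 →
        lrsSearch nums L k = lrsHasDup pre pw L k) :
    ∀ (d : Nat) (lo hi : Int), d = (hi - lo).toNat → 1 ≤ lo → hi ≤ L →
      lrsLoop nums L lo hi = lrsBs pre pw L lo hi := by
  intro d
  induction d using Nat.strong_induction_on with
  | _ d ih =>
      intro lo hi hd hlo hhi
      rw [lrsLoop, lrsBs]
      by_cases hlt : lo < hi
      · simp only [if_pos hlt]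
        have hfd : PySem.Int.floordiv (hi - lo) 2 = (hi - lo) / 2 :=
          PySem.Int.floordiv_eq_ediv_of_pos (by norm_num)
        have hmid1 : lo ≤ lo + PySem.Int.floordiv (hi - lo) 2 := by rw [hfd]; omega
        have hmid2 : lo + PySem.Int.floordiv (hi - lo) 2 < hi := by rw [hfd]; omega
        rw [H (lo + PySem.Int.floordiv (hi - lo) 2) (by omega) (by omega)]
        by_cases hsr : lrsHasDup pre pw L (lo + PySem.Int.floordiv (hi - lo) 2)
        · rw [if_pos hsr, if_pos hsr]
          exact ih (hi - (lo + PySem.Int.floordiv (hi - lo) 2 + 1)).toNat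
            (by rw [hfd] at *; omega) _ _ rfl (by omega) hhi
        · rw [if_neg hsr, if_neg hsr]
          exact ih ((lo + PySem.Int.floordiv (hi - lo) 2) - lo).toNat
            (by rw [hfd] at *; omega) _ _ rfl hlo (by omega)
      · rw [if_neg hlt, if_neg hlt]

-- ===== VERDICT (by name: the statement is the Claim_ definition above) =====
theorem longestRepeatingSubstring_spec : Claim_equal_longestRepeatingSubstring := by
  intro S _
  unfold Spec_longestRepeatingSubstring longestRepeatingSubstring longestRepeatingSubstring_alt
  have key : ∀ k : Int, 1 ≤ k → k ≤ (S.toList.length : Int) - 1 →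
      lrsSearch (S.toList.map (fun c => (c.toNat : Int) - 97)) (S.toList.length : Int) k
        = lrsHasDup (lrsPre S.toList 0) (lrsPw S.toList 1) (S.toList.length : Int) k := by
    intro k hk hkL
    have h1 := search_eq (S.toList.map (fun c => (c.toNat : Int) - 97)) k hk
      (by simpa using hkL)
    have h2 := hasDup_eq S.toList k hk hkL
    simp only [List.length_map] at h1
    rw [h1, h2]
  have main := loop_eq (S.toList.map (fun c => (c.toNat : Int) - 97))
      (lrsPre S.toList 0) (lrsPw S.toList 1) (S.toList.length : Int) key
      (((S.toList.length : Int) - 1)).toNat 1 (S.toList.length : Int) rfl (by omega) le_rfl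
  show lrsLoop (S.toList.map (fun c => (c.toNat : Int) - 97)) (S.toList.length : Int) 1
        (S.toList.length : Int) - 1
      = lrsBs (lrsPre S.toList 0) (lrsPw S.toList 1) (S.toList.length : Int) 1
        (S.toList.length : Int) - 1
  rw [main]
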